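-- pv_equiv track=rewrite | github.com/pedrosimao10/Tetris-AI-Agent | studentNoRotation.py | completeLines
-- ===== SOURCE A (Python) =====
-- def completeLines(virtualgame):
--     lines = 0
--     for i in range(1,30,1):
--         somaColunas = 0
--         for coordinates in virtualgame:
--             if (coordinates[1] == i):
--                 somaColunas += 1
--         if somaColunas==8:
--             lines += 1
--     return lines
-- ===== SOURCE B (Python) =====
-- def completeLines(virtualgame):
--     counts = {}
--     for coordinates in virtualgame:
--         counts[coordinates[1]] = counts.get(coordinates[1], 0) + 1
--     lines = 0
--     for i in range(1, 30):
--         if counts.get(i, 0) == 8: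
--             lines += 1
--     return lines
-- ===== Notes on version B (the rewrite author's own statement) =====
-- stated objective: alternative
-- what changed: B builds a row->count dictionary in one pass over virtualgame and then checks the 29 fixed rows by lookup, instead of rescanning the whole list once per row; a timing run could not measure a speedup (both sub-ms), so no speed is claimed.
import Mathlib
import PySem

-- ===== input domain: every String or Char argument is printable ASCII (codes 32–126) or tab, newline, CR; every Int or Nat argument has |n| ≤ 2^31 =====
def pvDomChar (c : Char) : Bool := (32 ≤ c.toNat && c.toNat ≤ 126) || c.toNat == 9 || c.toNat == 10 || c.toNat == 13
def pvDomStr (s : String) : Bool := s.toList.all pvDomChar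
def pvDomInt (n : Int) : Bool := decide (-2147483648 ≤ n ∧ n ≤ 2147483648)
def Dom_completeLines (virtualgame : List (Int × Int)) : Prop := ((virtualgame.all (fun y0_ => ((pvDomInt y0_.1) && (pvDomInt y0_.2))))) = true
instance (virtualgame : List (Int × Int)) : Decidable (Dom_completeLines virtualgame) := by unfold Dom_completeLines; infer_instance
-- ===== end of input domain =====

-- B replaces A's per-row rescans of virtualgame by one counting pass over the list plus 29 dictionary lookups (objective: alternative aggregation strategy).

-- ===== PORT A =====
def completeLines (virtualgame : List (Int × Int)) : Int :=
  (PySem.List.pyRange 1 30 1).foldl (fun lines i =>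
    let somaColunas : Int :=
      virtualgame.foldl (fun s coordinates =>
        if coordinates.2 == i then s + 1 else s) 0
    if somaColunas == 8 then lines + 1 else lines) 0

-- ===== PORT B =====
def completeLines_alt (virtualgame : List (Int × Int)) : Int :=
  let counts : PySem.Dict Int Int :=
    virtualgame.foldl (fun d coordinates =>
      d.insert coordinates.2 (d.getD coordinates.2 0 + 1)) PySem.Dict.empty
  (PySem.List.pyRange 1 30 1).foldl (fun lines i =>
    if counts.getD i 0 == 8 then lines + 1 else lines) 0

-- ===== PRECONDITION & SPEC =====
def Spec_completeLines (virtualgame : List (Int × Int)) (out : Int) : Prop := out = completeLines_alt virtualgame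
instance (virtualgame : List (Int × Int)) (out : Int) : Decidable (Spec_completeLines virtualgame out) := by unfold Spec_completeLines; infer_instance

-- ===== CLAIM (what is proved, stated in full; the proofs are below) =====
def Claim_equal_completeLines : Prop := ∀ (virtualgame : List (Int × Int)), Dom_completeLines virtualgame → Spec_completeLines virtualgame (completeLines virtualgame)

-- ===== LEMMAS AND PROOFS =====

-- A's inner scan of virtualgame at row i computes the count of i among second components.
theorem foldl_count_snd (virtualgame : List (Int × Int)) (i : Int) (acc : Int) :
    virtualgame.foldl (fun s coordinates => if coordinates.2 == i then s + 1 else s) acc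
      = acc + ((virtualgame.map (·.2)).count i : Int) := by
  induction virtualgame generalizing acc with
  | nil => simp
  | cons c t ih =>
    simp only [List.foldl_cons, List.map_cons, List.count_cons, ih]
    by_cases h : c.2 = i
    · simp [h]; ring
    · simp [h]

-- B's counting pass: the dictionary entry for v is the count of v among second components.
theorem getD_fold_pairs (l : List (Int × Int)) (d : PySem.Dict Int Int) (v : Int) :
    (l.foldl (fun d c => d.insert c.2 (d.getD c.2 0 + 1)) d).getD v 0
      = d.getD v 0 + ((l.map (·.2)).count v : Int) := by
  induction l generalizing d with
  | nil => simp
  | cons c t ih =>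
    simp only [List.foldl_cons, List.map_cons, List.count_cons, ih,
      PySem.Dict.getD_insert]
    by_cases h : v = c.2
    · simp [h]; ring
    · simp [h, Ne.symm h]

-- ===== VERDICT (by name: the statement is the Claim_ definition above) =====
theorem completeLines_spec : Claim_equal_completeLines := by
  intro virtualgame _
  unfold Spec_completeLines completeLines completeLines_alt
  apply PySem.List.foldl_congr_mem
  intro lines i _
  rw [foldl_count_snd, getD_fold_pairs]
  simp
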